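-- pv_equiv track=rewrite | github.com/megobrien3d/hvh | modify_partitions.py | find_cls_to_hsh_dict
-- ===== SOURCE A (Python) =====
-- def find_cls_to_hsh_dict(partitions, classes):
--     cls_to_hsh_dict = {}
--
--     for cls in classes:
--         curr_hash = []
--         for cls_1, _ in partitions:
--             curr_hash.append(int(cls in cls_1))
--         #curr_hash = ''.join(curr_hash)
--
--         cls_to_hsh_dict[cls] = curr_hash
--
--     return cls_to_hsh_dict
-- ===== SOURCE B (Python) =====
-- def find_cls_to_hsh_dict(partitions, classes):
--     n = len(partitions)
--     cls_to_hsh_dict = {cls: [0] * n for cls in classes}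
--     for j, (members, _) in enumerate(partitions):
--         for m in members:
--             if m in cls_to_hsh_dict:
--                 cls_to_hsh_dict[m][j] = 1
--     return cls_to_hsh_dict
-- ===== Notes on version B (the rewrite author's own statement) =====
-- stated objective: faster
-- what changed: Instead of scanning every partition's member list once per class (a membership test per class-partition pair), B zero-initializes each class's bit-vector and makes a single pass over each partition's members, setting the corresponding bit for members that are classes.
import Mathlib
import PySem

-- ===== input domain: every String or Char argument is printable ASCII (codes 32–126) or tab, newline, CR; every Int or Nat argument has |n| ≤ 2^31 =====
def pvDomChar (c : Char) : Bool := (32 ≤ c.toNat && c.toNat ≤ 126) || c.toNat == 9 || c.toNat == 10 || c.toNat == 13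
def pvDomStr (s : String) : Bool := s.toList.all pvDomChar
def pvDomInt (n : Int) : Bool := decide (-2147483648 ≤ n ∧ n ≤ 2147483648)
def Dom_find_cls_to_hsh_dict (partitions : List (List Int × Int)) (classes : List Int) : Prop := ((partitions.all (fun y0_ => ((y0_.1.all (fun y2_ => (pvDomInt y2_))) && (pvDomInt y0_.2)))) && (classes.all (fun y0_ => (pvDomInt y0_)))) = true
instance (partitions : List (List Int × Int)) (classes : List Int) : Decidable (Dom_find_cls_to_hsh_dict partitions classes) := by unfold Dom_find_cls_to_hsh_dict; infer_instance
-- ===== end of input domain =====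

-- B inverts A's loops: instead of one membership scan per (class, partition) pair, it
-- zero-initializes each class's bit-vector and makes a single pass over every partition's
-- members, setting the matching bit (objective: faster; return-value equivalence only).

-- ===== PORT A =====
def find_cls_to_hsh_dict (partitions : List (List Int × Int)) (classes : List Int) : List (Int × List Int) :=
  (classes.foldl
    (fun d cls =>
      d.insert cls
        (partitions.foldl (fun curr_hash p => curr_hash ++ [if cls ∈ p.1 then (1 : Int) else 0]) []))
    (PySem.Dict.empty)).items

-- ===== PORT B =====
def find_cls_to_hsh_dict_alt (partitions : List (List Int × Int)) (classes : List Int) : List (Int × List Int) :=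
  let n := partitions.length
  let d0 : PySem.Dict Int (List Int) :=
    classes.foldl (fun d cls => d.insert cls (List.replicate n (0 : Int))) PySem.Dict.empty
  -- d[m][j] = 1 (m is always a key when reached, so the [] default is never used)
  ((PySem.List.enumerate partitions).foldl
    (fun d jp =>
      jp.2.1.foldl
        (fun d m => if d.contains m then d.modify m [] (fun v => PySem.List.pySetD v jp.1 1) else d)
        d)
    d0).items

-- ===== PRECONDITION & SPEC =====
def Spec_find_cls_to_hsh_dict (partitions : List (List Int × Int)) (classes : List Int) (out : List (Int × List Int)) : Prop := out = find_cls_to_hsh_dict_alt partitions classes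
instance (partitions : List (List Int × Int)) (classes : List Int) (out : List (Int × List Int)) : Decidable (Spec_find_cls_to_hsh_dict partitions classes out) := by unfold Spec_find_cls_to_hsh_dict; infer_instance

-- ===== CLAIM (what is proved, stated in full; the proofs are below) =====
def Claim_equal_find_cls_to_hsh_dict : Prop := ∀ (partitions : List (List Int × Int)) (classes : List Int), Dom_find_cls_to_hsh_dict partitions classes → Spec_find_cls_to_hsh_dict partitions classes (find_cls_to_hsh_dict partitions classes)

-- ===== LEMMAS AND PROOFS =====

-- the distinct keys of the dict, in first-insertion order
def pvAddKeys : List Int → List Int → List Int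
  | ks, [] => ks
  | ks, c :: cs => pvAddKeys (if c ∈ ks then ks else ks ++ [c]) cs

theorem pv_contains_mk_map (g : Int → List Int) (ks : List Int) (c : Int) :
    (PySem.Dict.mk (ks.map (fun k => (k, g k)))).contains c = decide (c ∈ ks) := by
  induction ks with
  | nil => simp [PySem.Dict.contains_mk]
  | cons k ks ih =>
    simp only [PySem.Dict.contains_mk, List.map_cons, List.any_cons] at *
    by_cases h : k = c
    · simp [h, ih]
    · have h' : ¬ c = k := fun e => h e.symm
      simp [h, h', ih]

theorem pv_getD_mk_map (g : Int → List Int) (ks : List Int) (m : Int) (hm : m ∈ ks) :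
    (PySem.Dict.mk (ks.map (fun k => (k, g k)))).getD m [] = g m := by
  induction ks with
  | nil => cases hm
  | cons k ks ih =>
    rw [List.map_cons, PySem.Dict.getD_eq_get?_getD, PySem.Dict.get?_mk_cons]
    by_cases h : k = m
    · simp [h]
    · rcases List.mem_cons.mp hm with hm | hm
      · exact absurd hm.symm h
      · rw [if_neg (by simp [h]), ← PySem.Dict.getD_eq_get?_getD, ih hm]

theorem pv_insert_mk_mem (g : Int → List Int) (ks : List Int) (m : Int) (hm : m ∈ ks) (v : List Int) :
    (PySem.Dict.mk (ks.map (fun k => (k, g k)))).insert m v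
      = PySem.Dict.mk (ks.map (fun k => (k, if k = m then v else g k))) := by
  apply PySem.Dict.ext
  rw [PySem.Dict.items_insert_of_contains _ v (by simp [hm])]
  simp only [List.map_map]
  apply List.map_congr_left
  intro k _
  by_cases h : k = m <;> simp [h]

theorem pv_foldl_insert_mk (g : Int → List Int) (cs : List Int) : ∀ ks : List Int,
    cs.foldl (fun d c => d.insert c (g c)) (PySem.Dict.mk (ks.map (fun k => (k, g k))))
      = PySem.Dict.mk ((pvAddKeys ks cs).map (fun k => (k, g k))) := by
  induction cs with
  | nil => intro ks; rfl
  | cons c cs ih =>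
    intro ks
    rw [List.foldl_cons]
    by_cases hc : c ∈ ks
    · rw [pv_insert_mk_mem g ks c hc (g c)]
      have : (ks.map (fun k => (k, if k = c then g c else g k))) = ks.map (fun k => (k, g k)) := by
        apply List.map_congr_left; intro k _; by_cases h : k = c <;> simp [h]
      rw [this, ih ks]
      simp [pvAddKeys, hc]
    · have : (PySem.Dict.mk (ks.map (fun k => (k, g k)))).insert c (g c)
          = PySem.Dict.mk ((ks ++ [c]).map (fun k => (k, g k))) := by
        apply PySem.Dict.ext
        rw [PySem.Dict.items_insert_of_not_contains _ (g c) (by rw [pv_contains_mk_map]; simpa using hc)]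
        simp
      rw [this, ih (ks ++ [c])]
      simp [pvAddKeys, hc]

-- the inner member loop of B: every key in ms gets F applied once
theorem pv_member_fold (F : List Int → List Int) (hF : ∀ v, F (F v) = F v)
    (ms ks : List Int) : ∀ g : Int → List Int,
    ms.foldl (fun d m => if d.contains m then d.modify m [] F else d)
        (PySem.Dict.mk (ks.map (fun k => (k, g k))))
      = PySem.Dict.mk (ks.map (fun k => (k, if k ∈ ms then F (g k) else g k))) := by
  induction ms with
  | nil => intro g; simp
  | cons m ms ih =>
    intro g
    rw [List.foldl_cons]
    by_cases hm : m ∈ ks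
    · rw [if_pos (by simp [hm])]
      rw [show (PySem.Dict.mk (ks.map (fun k => (k, g k)))).modify m [] F
            = (PySem.Dict.mk (ks.map (fun k => (k, g k)))).insert m
                (F ((PySem.Dict.mk (ks.map (fun k => (k, g k)))).getD m [])) from rfl]
      rw [pv_getD_mk_map g ks m hm, pv_insert_mk_mem g ks m hm (F (g m))]
      rw [ih (fun k => if k = m then F (g m) else g k)]
      congr 1
      apply List.map_congr_left
      intro k _
      by_cases h : k = m
      · subst h; by_cases hr : k ∈ ms <;> simp [hr, hF]
      · by_cases hr : k ∈ ms <;> simp [h, hr]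
    · rw [if_neg (by simp [hm])]
      rw [ih g]
      congr 1
      apply List.map_congr_left
      intro k hk
      have h : ¬ k = m := fun e => hm (e ▸ hk)
      by_cases hr : k ∈ ms <;> simp [h, hr]

-- what the partition loop does to one key's vector
def pvApplyParts (c : Int) : Int → List (List Int × Int) → List Int → List Int
  | _, [], v => v
  | j, p :: rest, v => pvApplyParts c (j + 1) rest (if c ∈ p.1 then PySem.List.pySetD v j 1 else v)

theorem pv_outer_fold (suffix : List (List Int × Int)) : ∀ (s : Int), 0 ≤ s →
    ∀ (ks : List Int) (g : Int → List Int),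
    (PySem.List.enumerate suffix s).foldl
        (fun d jp =>
          jp.2.1.foldl
            (fun d m => if d.contains m then d.modify m [] (fun v => PySem.List.pySetD v jp.1 1) else d)
            d)
        (PySem.Dict.mk (ks.map (fun k => (k, g k))))
      = PySem.Dict.mk (ks.map (fun k => (k, pvApplyParts k s suffix (g k)))) := by
  induction suffix with
  | nil => intro s _ ks g; simp [PySem.List.enumerate_nil, pvApplyParts]
  | cons p rest ih =>
    intro s hs ks g
    rw [PySem.List.enumerate_cons, List.foldl_cons]
    have hF : ∀ v : List Int, PySem.List.pySetD (PySem.List.pySetD v s 1) s 1 = PySem.List.pySetD v s 1 := by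
      intro v
      rw [PySem.List.pySetD_of_nonneg v 1 hs, PySem.List.pySetD_of_nonneg _ 1 hs, List.set_set]
    rw [pv_member_fold (fun v => PySem.List.pySetD v s 1) hF p.1 ks g]
    have hs1 : (0 : Int) ≤ s + 1 := by omega
    rw [ih (s + 1) hs1 ks (fun k => if k ∈ p.1 then PySem.List.pySetD (g k) s 1 else g k)]
    rfl

theorem pv_applyParts_spec (c : Int) (suffix : List (List Int × Int)) : ∀ pre : List Int,
    pvApplyParts c (pre.length : Int) suffix (pre ++ List.replicate suffix.length 0)
      = pre ++ suffix.map (fun p => if c ∈ p.1 then (1 : Int) else 0) := by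
  induction suffix with
  | nil => intro pre; simp [pvApplyParts]
  | cons p rest ih =>
    intro pre
    rw [List.length_cons, List.replicate_succ, pvApplyParts]
    have hset : PySem.List.pySetD (pre ++ 0 :: List.replicate rest.length 0) (pre.length : Int) 1
        = pre ++ 1 :: List.replicate rest.length 0 := by
      rw [PySem.List.pySetD_natCast, List.set_append, if_neg (by omega)]
      simp
    have key : ∀ x : Int,
        pvApplyParts c ((pre.length : Int) + 1) rest ((pre ++ [x]) ++ List.replicate rest.length 0)
          = pre ++ x :: rest.map (fun p => if c ∈ p.1 then (1 : Int) else 0) := by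
      intro x
      have := ih (pre ++ [x])
      simp only [List.length_append, List.length_cons, List.length_nil, Nat.cast_add,
        Nat.cast_one, zero_add] at this
      rw [this]; simp
    by_cases hc : c ∈ p.1
    · rw [if_pos hc, hset, show pre ++ 1 :: List.replicate rest.length 0
          = (pre ++ [1]) ++ List.replicate rest.length 0 by simp, key]
      simp [hc]
    · rw [if_neg hc, show pre ++ 0 :: List.replicate rest.length 0
          = (pre ++ [(0 : Int)]) ++ List.replicate rest.length 0 by simp, key]
      simp [hc]

theorem pv_foldl_append (c : Int) (l : List (List Int × Int)) : ∀ init : List Int,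
    l.foldl (fun h p => h ++ [if c ∈ p.1 then (1 : Int) else 0]) init
      = init ++ l.map (fun p => if c ∈ p.1 then (1 : Int) else 0) := by
  induction l with
  | nil => intro init; simp
  | cons p rest ih => intro init; rw [List.foldl_cons, ih]; simp

-- ===== VERDICT (by name: the statement is the Claim_ definition above) =====
theorem find_cls_to_hsh_dict_spec : Claim_equal_find_cls_to_hsh_dict := by
  intro partitions classes _
  unfold Spec_find_cls_to_hsh_dict find_cls_to_hsh_dict find_cls_to_hsh_dict_alt
  have hA : ∀ cls : Int,
      partitions.foldl (fun h p => h ++ [if cls ∈ p.1 then (1 : Int) else 0]) []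
        = partitions.map (fun p => if cls ∈ p.1 then (1 : Int) else 0) := by
    intro cls; rw [pv_foldl_append]; simp
  simp only [hA]
  have eA := pv_foldl_insert_mk (fun k => partitions.map (fun p => if k ∈ p.1 then (1 : Int) else 0)) classes []
  have eB := pv_foldl_insert_mk (fun _ => List.replicate partitions.length (0 : Int)) classes []
  simp only [List.map_nil] at eA eB
  rw [show (PySem.Dict.empty : PySem.Dict Int (List Int)) = PySem.Dict.mk [] from rfl, eA, eB]
  rw [pv_outer_fold partitions 0 le_rfl (pvAddKeys [] classes)
    (fun _ => List.replicate partitions.length (0 : Int))]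
  congr 2
  apply List.map_congr_left
  intro k _
  have := pv_applyParts_spec k partitions []
  simp only [List.nil_append, List.length_nil, Nat.cast_zero] at this
  rw [this]
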